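-- pv_equiv track=rewrite | github.com/MrRobHack/Sentiment-Analysis | SentimentAnalyser.py | allCapitalDifferent
-- ===== SOURCE A (Python) =====
-- def allCapitalDifferent(words):
--     """
--     Check whether just some words in the input are ALL CAPS
--     :returns: `True` if some but not all items in `words` are ALL CAPS
--     """
--     allCapitalWords = 0
--     for word in words:
--         if word.isupper():
--             allCapitalWords += 1
--     cap_differential = len(words) - allCapitalWords
--     if 0 < cap_differential < len(words):
--         return True
--     else:
--         return False
-- ===== SOURCE B (Python) =====
-- def allCapitalDifferent(words):
--     """
--     Check whether just some words in the input are ALL CAPS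
--     :returns: `True` if some but not all items in `words` are ALL CAPS
--     """
--     return any(w.isupper() for w in words) and any(not w.isupper() for w in words)
-- ===== Notes on version B (the rewrite author's own statement) =====
-- stated objective: idiomatic
-- what changed: Replaces the counter loop plus len-arithmetic with two direct existence checks (any upper / any non-upper), maintaining no count and never calling len; both short-circuit.
import Mathlib
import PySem

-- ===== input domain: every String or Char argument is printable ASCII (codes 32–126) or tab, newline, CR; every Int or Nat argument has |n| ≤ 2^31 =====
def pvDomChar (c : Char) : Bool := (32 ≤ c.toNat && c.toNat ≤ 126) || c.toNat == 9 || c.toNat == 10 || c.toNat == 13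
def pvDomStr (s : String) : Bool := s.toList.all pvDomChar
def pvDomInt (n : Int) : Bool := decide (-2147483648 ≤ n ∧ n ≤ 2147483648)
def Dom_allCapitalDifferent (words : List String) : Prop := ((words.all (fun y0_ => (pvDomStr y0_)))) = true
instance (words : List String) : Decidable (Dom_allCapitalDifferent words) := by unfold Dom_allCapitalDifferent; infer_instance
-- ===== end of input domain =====

-- B checks 'some word is ALL CAPS and some word is not' by two existence checks (any/any), with no counter and no len arithmetic (idiomatic decomposition).

-- str.isupper() on the ASCII domain: some cased character exists and no lowercase character exists
-- (exact on the ASCII domain: Python cased chars there are exactly a-z/A-Z, so 'all cased are upper ∧ some cased' ↔ 'some upper ∧ no lower')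
def pyStrIsupper (s : String) : Bool :=
  (s.toList.any (fun c => PySem.Chars.isupper c)) && !(s.toList.any (fun c => PySem.Chars.islower c))

-- ===== PORT A =====
def allCapitalDifferent (words : List String) : Bool :=
  let allCapitalWords : Int :=
    words.foldl (fun acc word => if pyStrIsupper word then acc + 1 else acc) 0
  let cap_differential : Int := (words.length : Int) - allCapitalWords
  if 0 < cap_differential ∧ cap_differential < (words.length : Int) then true else false

-- ===== PORT B =====
def allCapitalDifferent_alt (words : List String) : Bool :=
  (words.any (fun w => pyStrIsupper w)) && (words.any (fun w => !pyStrIsupper w))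

-- ===== PRECONDITION & SPEC =====
def Spec_allCapitalDifferent (words : List String) (out : Bool) : Prop := out = allCapitalDifferent_alt words
instance (words : List String) (out : Bool) : Decidable (Spec_allCapitalDifferent words out) := by unfold Spec_allCapitalDifferent; infer_instance

-- ===== CLAIM (what is proved, stated in full; the proofs are below) =====
def Claim_equal_allCapitalDifferent : Prop := ∀ (words : List String), Dom_allCapitalDifferent words → Spec_allCapitalDifferent words (allCapitalDifferent words)

-- ===== LEMMAS AND PROOFS =====

-- A's counter loop computes countP
theorem foldl_count_eq (words : List String) (a : Int) :
    words.foldl (fun acc word => if pyStrIsupper word then acc + 1 else acc) a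
      = a + (words.countP (fun w => pyStrIsupper w) : Int) := by
  induction words generalizing a with
  | nil => simp
  | cons w ws ih =>
    simp only [List.foldl_cons, List.countP_cons, ih]
    by_cases h : pyStrIsupper w = true <;> simp [h] <;> push_cast <;> ring

-- ===== VERDICT (by name: the statement is the Claim_ definition above) =====
theorem allCapitalDifferent_spec : Claim_equal_allCapitalDifferent := by
  intro words _
  unfold Spec_allCapitalDifferent allCapitalDifferent allCapitalDifferent_alt
  simp only [foldl_count_eq, Int.zero_add]
  have hle : words.countP (fun w => pyStrIsupper w) ≤ words.length := List.countP_le_length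
  by_cases hA : words.any (fun w => pyStrIsupper w) = true
  · by_cases hB : words.any (fun w => !pyStrIsupper w) = true
    · -- some upper, some non-upper: 0 < countP < length
      have h1 : 0 < words.countP (fun w => pyStrIsupper w) := by
        rw [List.countP_pos_iff]
        obtain ⟨x, hx, hpx⟩ := List.any_eq_true.mp hA
        exact ⟨x, hx, hpx⟩
      have h2 : words.countP (fun w => pyStrIsupper w) < words.length := by
        rcases lt_or_eq_of_le hle with h | h
        · exact h
        · exfalso
          obtain ⟨x, hx, hpx⟩ := List.any_eq_true.mp hB
          have := (List.countP_eq_length).mp h x hx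
          simp_all
      simp only [hA, hB, Bool.and_self]
      rw [if_pos]
      constructor <;> omega
    · -- no non-upper: every word upper, countP = length
      have h : words.countP (fun w => pyStrIsupper w) = words.length := by
        rw [List.countP_eq_length]
        intro x hx
        by_contra hc
        exact hB (List.any_eq_true.mpr ⟨x, hx, by simp_all⟩)
      simp only [hA, hB, Bool.and_false]
      rw [if_neg]
      omega
  · -- no upper: countP = 0
    have h : words.countP (fun w => pyStrIsupper w) = 0 := by
      rw [List.countP_eq_zero]
      intro x hx
      by_contra hc
      exact hA (List.any_eq_true.mpr ⟨x, hx, by simp_all⟩)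
    simp only [hA, Bool.false_and]
    rw [if_neg]
    omega
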